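-- pv_equiv track=rewrite | github.com/allinne/advent2023 | 01b.py | find_word
-- ===== SOURCE A (Python) =====
-- digits ='1234567890'
--
-- def find_word(s, vcblr):
--     '''
--     >>> find_word('two1nine', words)
--     ('2', 0)
--
--     >>> find_word('eightwothree', words)
--     ('8', 0)
--
--     >>> find_word('abcone2threexyz', words)
--     ('1', 3)
--
--     >>> find_word('xtwone3four', words)
--     ('2', 1)
--
--     >>> find_word('4nineeightseven2', words)
--     ('9', 1)
--
--     >>> find_word('zoneight234', words)
--     ('1', 1)
--
--     >>> find_word('7pqrstsixteen', words)
--     ('6', 6)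
--
--     >>> find_word('treb7uchet', words)
--     ('0', -1)
--
--
--     >>> find_word('two1nine'[::-1], words_reversed)
--     ('9', 0)
--
--     >>> find_word('eightwothree'[::-1], words_reversed)
--     ('3', 0)
--
--     >>> find_word('abcone2threexyz'[::-1], words_reversed)
--     ('3', 3)
--
--     >>> find_word('xtwone3four'[::-1], words_reversed)
--     ('4', 0)
--
--     >>> find_word('4nineeightseven2'[::-1], words_reversed)
--     ('7', 1)
--
--     >>> find_word('zoneight234'[::-1], words_reversed)
--     ('8', 3)
--
--     >>> find_word('7pqrstsixteen'[::-1], words_reversed)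
--     ('6', 4)
--
--
--     >>> find_word('treb7uchet'[::-1], words_reversed)
--     ('0', -1)
--
--     '''
--     ix_min = -1
--     ch = '0'
--     for i in range(len(vcblr)):
--         w = vcblr[i]
--         ix = s.find(w)
--         if ix > -1:
--             if ch == '0':
--                 ix_min = ix
--                 ch = digits[i]
--             else:
--                 if ix < ix_min:
--                     ix_min = ix
--                     ch = digits[i]
--     return (ch, ix_min)
-- ===== SOURCE B (Python) =====
-- digits = '1234567890'
--
-- def find_word(s, vcblr):
--     for i in range(len(s) + 1):
--         for j, w in enumerate(vcblr):
--             if s.startswith(w, i):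
--                 return (digits[j], i)
--     return ('0', -1)
-- ===== Notes on version B (the rewrite author's own statement) =====
-- stated objective: alternative
-- what changed: A calls s.find(w) for every vocabulary word and keeps a running minimum index with first-wins tie-breaking; B instead scans start positions of s left to right and returns at the first position where some word starts (words tried in vocabulary order), never computing per-word find results.
import Mathlib
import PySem

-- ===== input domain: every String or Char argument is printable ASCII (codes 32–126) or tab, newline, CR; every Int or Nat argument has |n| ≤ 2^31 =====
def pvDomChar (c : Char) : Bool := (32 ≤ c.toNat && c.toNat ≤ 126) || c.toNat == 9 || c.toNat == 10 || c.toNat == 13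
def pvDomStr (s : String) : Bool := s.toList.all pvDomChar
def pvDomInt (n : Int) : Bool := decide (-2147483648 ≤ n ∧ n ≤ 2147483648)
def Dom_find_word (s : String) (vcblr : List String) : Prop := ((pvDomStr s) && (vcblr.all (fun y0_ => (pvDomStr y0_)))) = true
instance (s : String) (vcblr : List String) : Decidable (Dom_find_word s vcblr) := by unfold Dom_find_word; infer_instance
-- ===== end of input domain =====

-- B replaces A's per-word s.find scans with running-minimum bookkeeping by a single
-- left-to-right scan over start positions that returns at the first position where some
-- vocabulary word starts (words tried in vocabulary order). Objective: alternative.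

-- module-level constant  digits = '1234567890'
def pyDigits : String := "1234567890"

-- digits[i] as the 1-character string; Python raises IndexError out of range — those
-- inputs are excluded by Pre_find_word, so the "?" default is never reached there.
def pyDigitAt (i : Int) : String :=
  match PySem.Str.pyGet? pyDigits i with
  | some c => String.ofList [c]
  | none => "?"

-- ===== PORT A =====
-- for i in range(len(vcblr)): w = vcblr[i]; ix = s.find(w); …  (state = (ch, ix_min))
def find_word (s : String) (vcblr : List String) : String × Int :=
  (PySem.List.pyRange 0 (vcblr.length : Int) 1).foldl
    (fun (st : String × Int) i =>
      let w := PySem.List.pyGetD vcblr i ""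
      let ix := PySem.Str.find s w
      if ix > -1 then
        if st.1 == "0" then (pyDigitAt i, ix)
        else if ix < st.2 then (pyDigitAt i, ix)
        else st
      else st)
    ("0", -1)

-- ===== PORT B =====
-- inner loop: for j, w in enumerate(vcblr): if s.startswith(w, i): return (digits[j], i)
-- (s.startswith(w, i) for 0 ≤ i ≤ len(s) is exactly: w.toList is a prefix of s.toList.drop i)
def altInner (t : List Char) (vcblr : List String) (j : Nat) : Option Nat :=
  match vcblr with
  | [] => none
  | w :: ws => if PySem.Chars.startswith t w.toList then some j else altInner t ws (j + 1)

-- outer loop: for i in range(len(s) + 1): … ; fuel counts the remaining positions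
def altGo (cs : List Char) (vcblr : List String) (i : Nat) : Nat → String × Int
  | 0 => ("0", -1)
  | Nat.succ k =>
    match altInner (cs.drop i) vcblr 0 with
    | some j => (pyDigitAt j, (i : Int))
    | none => altGo cs vcblr (i + 1) k

def find_word_alt (s : String) (vcblr : List String) : String × Int :=
  altGo s.toList vcblr 0 (s.toList.length + 1)

-- ===== PRECONDITION & SPEC =====
-- Pre_ excludes vocabularies with a word at index ≥ 10 occurring in s: on those inputs
-- Python A evaluates digits[i] with i ≥ 10 and can raise IndexError (depending on the
-- loop state; where it happens not to raise, B's value would also equal A's).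
def Pre_find_word (s : String) (vcblr : List String) : Prop :=
  ∀ w ∈ vcblr.drop 10, PySem.Str.isIn w s = false
instance (s : String) (vcblr : List String) : Decidable (Pre_find_word s vcblr) := by
  unfold Pre_find_word; infer_instance

def pvWitness_find_word : String × List String :=
  ("two1nine", ["one", "two", "three", "four", "five", "six", "seven", "eight", "nine"])

def Spec_find_word (s : String) (vcblr : List String) (out : String × Int) : Prop := out = find_word_alt s vcblr
instance (s : String) (vcblr : List String) (out : String × Int) : Decidable (Spec_find_word s vcblr out) := by unfold Spec_find_word; infer_instance

-- ===== CLAIM (what is proved, stated in full; the proofs are below) =====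
def Claim_equal_find_word : Prop := ∀ (s : String) (vcblr : List String), Dom_find_word s vcblr → Pre_find_word s vcblr → Spec_find_word s vcblr (find_word s vcblr)

-- ===== LEMMAS AND PROOFS =====

lemma pv_pyDigitAt_eq_zero_iff (j : Nat) : pyDigitAt (j : Int) = "0" ↔ j = 9 := by
  by_cases h : j < 10
  · interval_cases j <;> simp [pyDigitAt, pyDigits]
  · have hn : pyDigits.toList[j]? = none := by
      rw [List.getElem?_eq_none]
      simp [pyDigits]; omega
    simp [pyDigitAt, hn]
    omega

lemma pv_prefix_drop_infix {w cs : List Char} {i : Nat} (h : w <+: cs.drop i) : w <:+: cs :=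
  h.isInfix.trans (List.drop_suffix i cs).isInfix

-- A's loop body over s.toList, with the index already a Nat
def pvBody (cs : List Char) (ws : List String) (st : String × Int) (k : Nat) : String × Int :=
  if PySem.Chars.find cs (ws.getD k "").toList > -1 then
    if st.1 == "0" then (pyDigitAt k, PySem.Chars.find cs (ws.getD k "").toList)
    else if PySem.Chars.find cs (ws.getD k "").toList < st.2 then (pyDigitAt k, PySem.Chars.find cs (ws.getD k "").toList)
    else st
  else st

lemma pv_find_word_eq (s : String) (vcblr : List String) :
    find_word s vcblr = (List.range' 0 vcblr.length).foldl (pvBody s.toList vcblr) ("0", -1) := by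
  unfold find_word
  rw [PySem.List.pyRange_one]
  simp only [List.foldl_map, Int.sub_zero, Int.toNat_natCast, ← List.range_eq_range']
  congr 1
  funext st k
  simp [pvBody, List.getD]

lemma pv_foldA_id (cs : List Char) (ws : List String) :
    ∀ (d a : Nat) (st : String × Int),
      (∀ j, a ≤ j → j < a + d → ¬ ((-1 : Int) < PySem.Chars.find cs (ws.getD j "").toList)) →
      (List.range' a d).foldl (pvBody cs ws) st = st := by
  intro d
  induction d with
  | zero => intro a st _; simp
  | succ d ih =>
    intro a st h
    rw [List.range'_succ, List.foldl_cons]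
    have hna := h a (Nat.le_refl a) (by omega)
    rw [show pvBody cs ws st a = st by simp only [pvBody]; rw [if_neg hna]]
    exact ih (a + 1) st (fun j h1 h2 => h j (by omega) (by omega))

lemma pv_foldA_run (cs : List Char) (ws : List String) (M J : Nat)
    (hJn : J < ws.length)
    (hJpfx : (ws.getD J "").toList <+: cs.drop M)
    (hJmin : ∀ j < J, ¬ (ws.getD j "").toList <+: cs.drop M)
    (hMmin : ∀ i < M, ∀ j < ws.length, ¬ (ws.getD j "").toList <+: cs.drop i)
    (hpre : ∀ j, 10 ≤ j → j < ws.length → PySem.Chars.find cs (ws.getD j "").toList = -1) :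
    ∀ (d a : Nat) (st : String × Int), a + d = ws.length →
      ((st = ("0", -1) ∧ ∀ j < a, ¬ ((0:Int) ≤ PySem.Chars.find cs (ws.getD j "").toList)) ∨
       (∃ jb, jb < a ∧ jb ≤ 9 ∧ (0:Int) ≤ PySem.Chars.find cs (ws.getD jb "").toList ∧
          st = (pyDigitAt (jb : Int), PySem.Chars.find cs (ws.getD jb "").toList) ∧
          (∀ j < a, (0:Int) ≤ PySem.Chars.find cs (ws.getD j "").toList →
            PySem.Chars.find cs (ws.getD jb "").toList ≤ PySem.Chars.find cs (ws.getD j "").toList) ∧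
          (∀ j < jb, (0:Int) ≤ PySem.Chars.find cs (ws.getD j "").toList →
            PySem.Chars.find cs (ws.getD jb "").toList < PySem.Chars.find cs (ws.getD j "").toList))) →
      (List.range' a d).foldl (pvBody cs ws) st = (pyDigitAt (J : Int), (M : Int)) := by
  -- derived facts about J and M
  have hJ0 : (0:Int) ≤ PySem.Chars.find cs (ws.getD J "").toList :=
    (PySem.Chars.find_nonneg_iff _ _).mpr (pv_prefix_drop_infix hJpfx)
  obtain ⟨hJp, hJlt⟩ := PySem.Chars.find_spec hJ0
  have hFJ : PySem.Chars.find cs (ws.getD J "").toList = (M : Int) := by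
    have hle : (PySem.Chars.find cs (ws.getD J "").toList).toNat ≤ M := by
      by_contra hc
      exact hJlt M (by omega) hJpfx
    have hge : M ≤ (PySem.Chars.find cs (ws.getD J "").toList).toNat := by
      by_contra hc
      exact hMmin _ (by omega) J hJn hJp
    omega
  have hFglob : ∀ j < ws.length, (0:Int) ≤ PySem.Chars.find cs (ws.getD j "").toList →
      (M : Int) ≤ PySem.Chars.find cs (ws.getD j "").toList := by
    intro j hj h0
    obtain ⟨hp, _⟩ := PySem.Chars.find_spec h0
    by_contra hc
    exact hMmin _ (by omega) j hj hp
  have hFbef : ∀ j < J, (0:Int) ≤ PySem.Chars.find cs (ws.getD j "").toList →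
      (M : Int) < PySem.Chars.find cs (ws.getD j "").toList := by
    intro j hj h0
    have hge := hFglob j (by omega) h0
    rcases lt_or_eq_of_le hge with h | h
    · exact h
    · exfalso
      obtain ⟨hp, _⟩ := PySem.Chars.find_spec h0
      rw [show (PySem.Chars.find cs (ws.getD j "").toList).toNat = M by omega] at hp
      exact hJmin j hj hp
  intro d
  induction d with
  | zero =>
    intro a st ha hinv
    simp only [List.range', List.foldl_nil]
    rcases hinv with ⟨_, hno⟩ | ⟨jb, hjb, _, hjbpos, hst, hall, hstrict⟩
    · exact absurd hJ0 (hno J (by omega))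
    · have h1 : PySem.Chars.find cs (ws.getD jb "").toList = (M : Int) := by
        have := hall J (by omega) hJ0
        have := hFglob jb (by omega) hjbpos
        omega
      obtain ⟨hp, _⟩ := PySem.Chars.find_spec hjbpos
      rw [show (PySem.Chars.find cs (ws.getD jb "").toList).toNat = M by omega] at hp
      have hnlt : ¬ jb < J := fun h => hJmin jb h hp
      have hngt : ¬ J < jb := by
        intro h
        have := hstrict J h hJ0
        omega
      have : jb = J := by omega
      subst this
      rw [hst, h1]
  | succ d ih =>
    intro a st ha hinv
    rw [List.range'_succ, List.foldl_cons]
    apply ih (a + 1) _ (by omega)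
    by_cases hPa : (-1 : Int) < PySem.Chars.find cs (ws.getD a "").toList
    · have hA0 : (0:Int) ≤ PySem.Chars.find cs (ws.getD a "").toList := by omega
      have han : a < ws.length := by omega
      have ha9 : a ≤ 9 := by
        by_contra hc
        rw [hpre a (by omega) han] at hPa
        omega
      rcases hinv with ⟨hst, hno⟩ | ⟨jb, hjb, hjb9, hjbpos, hst, hall, hstrict⟩
      · subst hst
        have hb : pvBody cs ws ("0", -1) a =
            (pyDigitAt (a : Int), PySem.Chars.find cs (ws.getD a "").toList) := by
          simp only [pvBody]
          rw [if_pos hPa, if_pos (show ((("0", (-1:Int)).1 == "0") = true) from rfl)]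
        rw [hb]
        right
        refine ⟨a, by omega, ha9, hA0, rfl, ?_, ?_⟩
        · intro j hj h0
          rcases Nat.lt_or_ge j a with h | h
          · exact absurd h0 (hno j h)
          · have : j = a := by omega
            subst this; exact le_refl _
        · intro j hj h0
          exact absurd h0 (hno j (by omega))
      · have hjb8 : jb ≤ 8 := by omega
        have hch : (pyDigitAt (jb : Int) == "0") = false := by
          rw [beq_eq_false_iff_ne]
          intro hq
          have := (pv_pyDigitAt_eq_zero_iff jb).mp hq
          omega
        subst hst
        have key : pvBody cs ws (pyDigitAt (jb : Int), PySem.Chars.find cs (ws.getD jb "").toList) a =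
            if PySem.Chars.find cs (ws.getD a "").toList < PySem.Chars.find cs (ws.getD jb "").toList
            then (pyDigitAt (a : Int), PySem.Chars.find cs (ws.getD a "").toList)
            else (pyDigitAt (jb : Int), PySem.Chars.find cs (ws.getD jb "").toList) := by
          simp only [pvBody]
          rw [if_pos hPa, if_neg (by simp [hch])]
        rw [key]
        by_cases hlt : PySem.Chars.find cs (ws.getD a "").toList < PySem.Chars.find cs (ws.getD jb "").toList
        · rw [if_pos hlt]
          right
          refine ⟨a, by omega, ha9, hA0, rfl, ?_, ?_⟩
          · intro j hj h0
            rcases Nat.lt_or_ge j a with h | h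
            · exact le_of_lt (lt_of_lt_of_le hlt (hall j h h0))
            · have : j = a := by omega
              subst this; exact le_refl _
          · intro j hj h0
            exact lt_of_lt_of_le hlt (hall j (by omega) h0)
        · rw [if_neg hlt]
          right
          refine ⟨jb, by omega, hjb9, hjbpos, rfl, ?_, hstrict⟩
          intro j hj h0
          rcases Nat.lt_or_ge j a with h | h
          · exact hall j h h0
          · have : j = a := by omega
            subst this; omega
    · rw [show pvBody cs ws st a = st by simp only [pvBody]; rw [if_neg hPa]]
      rcases hinv with ⟨hst, hno⟩ | ⟨jb, hjb, hjb9, hjbpos, hst, hall, hstrict⟩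
      · left
        refine ⟨hst, ?_⟩
        intro j hj
        rcases Nat.lt_or_ge j a with h | h
        · exact hno j h
        · have : j = a := by omega
          subst this
          omega
      · right
        refine ⟨jb, by omega, hjb9, hjbpos, hst, ?_, hstrict⟩
        intro j hj h0
        rcases Nat.lt_or_ge j a with h | h
        · exact hall j h h0
        · have : j = a := by omega
          subst this
          omega

lemma pv_altInner_none : ∀ (ws : List String) (t : List Char) (j0 : Nat),
    (∀ w ∈ ws, ¬ w.toList <+: t) → altInner t ws j0 = none := by
  intro ws
  induction ws with
  | nil => intro t j0 _; rfl
  | cons w ws ih =>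
    intro t j0 h
    have hw : PySem.Chars.startswith t w.toList = false := by
      rw [← Bool.not_eq_true, PySem.Chars.startswith_iff]
      exact h w (List.mem_cons_self ..)
    simp only [altInner, hw, Bool.false_eq_true, if_false]
    exact ih t (j0 + 1) (fun v hv => h v (List.mem_cons_of_mem _ hv))

lemma pv_altInner_some : ∀ (ws : List String) (j : Nat) (t : List Char) (j0 : Nat),
    j < ws.length → (ws.getD j "").toList <+: t →
    (∀ j' < j, ¬ (ws.getD j' "").toList <+: t) →
    altInner t ws j0 = some (j0 + j) := by
  intro ws
  induction ws with
  | nil => intro j t j0 hj; simp at hj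
  | cons w ws ih =>
    intro j t j0 hj hpfx hmin
    match j with
    | 0 =>
      have hw : PySem.Chars.startswith t w.toList = true := by
        rw [PySem.Chars.startswith_iff]
        simpa using hpfx
      simp [altInner, hw]
    | Nat.succ j' =>
      have hw : PySem.Chars.startswith t w.toList = false := by
        rw [← Bool.not_eq_true, PySem.Chars.startswith_iff]
        simpa using hmin 0 (by omega)
      simp only [altInner, hw, Bool.false_eq_true, if_false]
      rw [ih j' t (j0 + 1) (by simpa using hj) (by simpa using hpfx)
        (fun k hk => by simpa using hmin (k + 1) (by omega))]
      congr 1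
      omega

lemma pv_altGo_nomatch (cs : List Char) (ws : List String)
    (h : ∀ (i : Nat), ∀ w ∈ ws, ¬ w.toList <+: cs.drop i) :
    ∀ (k i : Nat), altGo cs ws i k = ("0", -1) := by
  intro k
  induction k with
  | zero => intro i; rfl
  | succ k ih =>
    intro i
    simp only [altGo, pv_altInner_none ws (cs.drop i) 0 (h i)]
    exact ih (i + 1)

lemma pv_altGo_match (cs : List Char) (ws : List String) (M J : Nat)
    (hJn : J < ws.length)
    (hJpfx : (ws.getD J "").toList <+: cs.drop M)
    (hJmin : ∀ j < J, ¬ (ws.getD j "").toList <+: cs.drop M)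
    (hMmin : ∀ i < M, ∀ w ∈ ws, ¬ w.toList <+: cs.drop i) :
    ∀ (k i : Nat), i ≤ M → M < i + k → altGo cs ws i k = (pyDigitAt (J : Int), (M : Int)) := by
  intro k
  induction k with
  | zero => intro i h1 h2; omega
  | succ k ih =>
    intro i h1 h2
    rcases Nat.lt_or_ge i M with h | h
    · simp only [altGo, pv_altInner_none ws (cs.drop i) 0 (hMmin i h)]
      exact ih (i + 1) (by omega) (by omega)
    · have : i = M := by omega
      subst this
      simp only [altGo, pv_altInner_some ws J (cs.drop i) 0 hJn hJpfx hJmin, Nat.zero_add]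

lemma pv_main : ∀ (s : String) (vcblr : List String), Pre_find_word s vcblr →
    find_word s vcblr = find_word_alt s vcblr := by
  intro s vcblr hpre
  have hpre' : ∀ j, 10 ≤ j → j < vcblr.length →
      PySem.Chars.find s.toList (vcblr.getD j "").toList = -1 := by
    intro j h10 hj
    have h2 : j - 10 < (vcblr.drop 10).length := by simp; omega
    have hmem : vcblr[j] ∈ vcblr.drop 10 := by
      have hg : (vcblr.drop 10)[j - 10] = vcblr[j] := by
        rw [List.getElem_drop]; congr 1; omega
      rw [← hg]; exact List.getElem_mem _
    have hii := hpre _ hmem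
    rw [List.getD_eq_getElem vcblr "" hj, PySem.Chars.find_eq_neg_one_iff]
    intro hinf
    rw [← PySem.Str.isIn_iff_infix] at hinf
    rw [hinf] at hii
    simp at hii
  rw [pv_find_word_eq, find_word_alt]
  by_cases hex : ∃ i : Nat, ∃ w ∈ vcblr, w.toList <+: s.toList.drop i
  · have hQM := Nat.find_spec hex
    have hMmin : ∀ i < Nat.find hex, ∀ w ∈ vcblr, ¬ w.toList <+: s.toList.drop i := by
      intro i hi w hw hp
      exact Nat.find_min hex hi ⟨w, hw, hp⟩
    set M := Nat.find hex with hM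
    set J := vcblr.findIdx (fun w => decide (w.toList <+: s.toList.drop M)) with hJ
    have hJn : J < vcblr.length := by
      apply List.findIdx_lt_length_of_exists
      obtain ⟨w, hw, hp⟩ := hQM
      exact ⟨w, hw, by simpa using hp⟩
    have hJpfx : (vcblr.getD J "").toList <+: s.toList.drop M := by
      rw [List.getD_eq_getElem vcblr "" hJn]
      have := List.findIdx_getElem (p := fun w => decide (w.toList <+: s.toList.drop M))
        (xs := vcblr) (w := hJn)
      simpa using this
    have hJmin : ∀ j < J, ¬ (vcblr.getD j "").toList <+: s.toList.drop M := by
      intro j hj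
      rw [List.getD_eq_getElem vcblr "" (by omega)]
      have := List.not_of_lt_findIdx (p := fun w => decide (w.toList <+: s.toList.drop M))
        (xs := vcblr) (i := j) (by exact hj)
      simpa using this
    have hMminIdx : ∀ i < M, ∀ j < vcblr.length, ¬ (vcblr.getD j "").toList <+: s.toList.drop i := by
      intro i hi j hj
      rw [List.getD_eq_getElem vcblr "" hj]
      exact hMmin i hi _ (List.getElem_mem _)
    have hMlen : M ≤ s.toList.length := by
      by_contra hc
      obtain ⟨w, hw, hp⟩ := hQM
      have hd : s.toList.drop M = [] := List.drop_eq_nil_of_le (by omega)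
      rw [hd, List.prefix_nil] at hp
      exact hMmin s.toList.length (by omega) w hw (by rw [hp]; exact List.nil_prefix)
    rw [pv_foldA_run s.toList vcblr M J hJn hJpfx hJmin hMminIdx hpre' vcblr.length 0 _ (by omega)
      (Or.inl ⟨rfl, by omega⟩)]
    rw [pv_altGo_match s.toList vcblr M J hJn hJpfx hJmin hMmin (s.toList.length + 1) 0
      (by omega) (by omega)]
  · push Not at hex
    have hno : ∀ j, 0 ≤ j → j < 0 + vcblr.length →
        ¬ ((-1 : Int) < PySem.Chars.find s.toList (vcblr.getD j "").toList) := by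
      intro j _ hj
      rw [List.getD_eq_getElem vcblr "" (by omega)]
      intro hgt
      have h0 : (0:Int) ≤ PySem.Chars.find s.toList (vcblr[j]).toList := by omega
      obtain ⟨hp, _⟩ := PySem.Chars.find_spec h0
      exact hex _ _ (List.getElem_mem _) hp
    rw [pv_foldA_id s.toList vcblr vcblr.length 0 ("0", -1) hno]
    rw [pv_altGo_nomatch s.toList vcblr hex (s.toList.length + 1) 0]

-- ===== VERDICT (by name: the statement is the Claim_ definition above) =====
theorem find_word_spec : Claim_equal_find_word :=
  fun s vcblr _ hpre => pv_main s vcblr hpre
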